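-- pv_equiv track=rewrite | github.com/jmarias-edu/python-portfolio | 04 AI Exercises using Python/Exer2 (BFS and DFS for Eight Puzzle Game)/testing_rounds.py | getMovable
-- ===== SOURCE A (Python) =====
-- def getMovable(p): #Function to see what buttons are movable, also returns coordinate of button with 0
--     movable = []
--     directions = []
--     for i in range(3):
--         for j in range(3):
--             if p[i][j] == 0:
--                 if i == 0 and j == 0:
--                     movable.extend((1,3))
--                     directions.extend(("R", "D"))
--                 elif i == 0 and j == 1:
--                     movable.extend((0,2,4))
--                     directions.extend(("R","D","L"))
--                 elif i == 0 and j == 2: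
--                     movable.extend((1,5))
--                     directions.extend(("D","L"))
--                 elif i == 1 and j == 0:
--                     movable.extend((0,4,6))
--                     directions.extend(("U","R","D"))
--                 elif i == 1 and j == 1:
--                     movable.extend((1,3,5,7))
--                     directions.extend(("U","R","D","L"))
--                 elif i == 1 and j == 2:
--                     movable.extend((2,4,8))
--                     directions.extend(("U","D","L"))
--                 elif i == 2 and j == 0:
--                     movable.extend((3,7))
--                     directions.extend(("U","R"))
--                 elif i == 2 and j == 1:
--                     movable.extend((4,6,8))
--                     directions.extend(("U","R","L"))
--                 elif i == 2 and j == 2: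
--                     movable.extend((5,7))
--                     directions.extend(("U","L"))
--
--                 return movable, i, j, directions
-- ===== SOURCE B (Python) =====
-- def getMovable(p):  # delta-table driven: one flat scan for 0, then derive both lists from direction vectors
--     DELTAS = [("U", -1, 0), ("R", 0, 1), ("D", 1, 0), ("L", 0, -1)]
--     for k in range(9):
--         i, j = divmod(k, 3)
--         if p[i][j] == 0:
--             legal = [(d, 3 * (i + di) + (j + dj)) for d, di, dj in DELTAS
--                      if 0 <= i + di < 3 and 0 <= j + dj < 3]
--             movable = sorted(idx for _, idx in legal)
--             directions = [d for d, _ in legal]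
--             return movable, i, j, directions
-- ===== Notes on version B (the rewrite author's own statement) =====
-- stated objective: simpler
-- what changed: B replaces the nested 3x3 loops with a single flat scan over range(9) plus divmod, and replaces A's 9-branch hard-coded neighbour table with one direction-vector table (DELTAS) filtered by bounds, from which directions are read off and movable is obtained by sorting the flat target indices.
-- outside the precondition, e.g. on getMovable([[1, 2, 3], [4, 5, 6], [7, 8, 9]]): A returns None, B returns None
import Mathlib
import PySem

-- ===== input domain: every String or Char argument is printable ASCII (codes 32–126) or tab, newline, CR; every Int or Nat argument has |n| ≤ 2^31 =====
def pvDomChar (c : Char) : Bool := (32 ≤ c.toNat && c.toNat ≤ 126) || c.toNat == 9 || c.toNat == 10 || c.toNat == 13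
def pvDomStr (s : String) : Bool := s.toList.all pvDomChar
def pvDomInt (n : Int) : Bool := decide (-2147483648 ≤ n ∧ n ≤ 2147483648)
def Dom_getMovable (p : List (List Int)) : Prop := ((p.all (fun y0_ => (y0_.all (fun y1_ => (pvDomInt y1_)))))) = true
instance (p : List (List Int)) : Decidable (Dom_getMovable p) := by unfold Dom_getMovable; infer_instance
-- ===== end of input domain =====

-- B replaces A's 9-branch hard-coded neighbour table with a flat scan (range(9)+divmod) and a
-- direction-vector table from which both output lists are derived (movable by sorting) — objective: simpler.


-- p[i][j] as Python computes it (none = IndexError); shared read primitive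
def pvCell (p : List (List Int)) (i j : Int) : Option Int :=
  (PySem.List.pyGet? p i).bind (fun row => PySem.List.pyGet? row j)

-- ===== PORT A =====
-- the unrolled iteration order of A's `for i in range(3): for j in range(3):`
def pvPairs : List (Int × Int) :=
  [(0,0),(0,1),(0,2),(1,0),(1,1),(1,2),(2,0),(2,1),(2,2)]

-- A's 9-case elif chain (implicit fall-through keeps both accumulators empty)
def tableA (i j : Int) : List Int × List String :=
  if i = 0 ∧ j = 0 then ([1,3], ["R","D"])
  else if i = 0 ∧ j = 1 then ([0,2,4], ["R","D","L"])
  else if i = 0 ∧ j = 2 then ([1,5], ["D","L"])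
  else if i = 1 ∧ j = 0 then ([0,4,6], ["U","R","D"])
  else if i = 1 ∧ j = 1 then ([1,3,5,7], ["U","R","D","L"])
  else if i = 1 ∧ j = 2 then ([2,4,8], ["U","D","L"])
  else if i = 2 ∧ j = 0 then ([3,7], ["U","R"])
  else if i = 2 ∧ j = 1 then ([4,6,8], ["U","R","L"])
  else if i = 2 ∧ j = 2 then ([5,7], ["U","L"])
  else ([], [])

-- the nested loops with early return; none = A raised (IndexError) or fell off the loop (returned None)
def goA (p : List (List Int)) : List (Int × Int) → Option (List Int × Int × Int × List String)
  | [] => none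
  | (i, j) :: rest =>
    match pvCell p i j with
    | none => none
    | some v => if v = 0 then some ((tableA i j).1, i, j, (tableA i j).2) else goA p rest

def getMovable (p : List (List Int)) : List Int × Int × Int × List String :=
  (goA p pvPairs).getD ([], 0, 0, [])

-- ===== PORT B =====
-- B's DELTAS table: (direction, di, dj) in priority order
def deltasB : List (String × Int × Int) := [("U",-1,0),("R",0,1),("D",1,0),("L",0,-1)]

-- B's `legal` comprehension: in-bounds deltas, each paired with its flat target index
def legalB (i j : Int) : List (String × Int) :=
  (deltasB.filter (fun d =>
      decide (0 ≤ i + d.2.1 ∧ i + d.2.1 < 3 ∧ 0 ≤ j + d.2.2 ∧ j + d.2.2 < 3))).map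
    (fun d => (d.1, 3 * (i + d.2.1) + (j + d.2.2)))

-- B's two result lists: movable = sorted target indices, directions = the kept tags
def outB (i j : Int) : List Int × List String :=
  (PySem.List.sorted ((legalB i j).map (fun x => x.2)) (fun x => x) false,
   (legalB i j).map (fun x => x.1))

-- B's single flat loop `for k in range(9)` with i, j = divmod(k, 3)
def goB (p : List (List Int)) : List Int → Option (List Int × Int × Int × List String)
  | [] => none
  | k :: rest =>
    let i := PySem.Int.floordiv k 3
    let j := PySem.Int.mod k 3
    match pvCell p i j with
    | none => none
    | some v => if v = 0 then some ((outB i j).1, i, j, (outB i j).2) else goB p rest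

def getMovable_alt (p : List (List Int)) : List Int × Int × Int × List String :=
  (goB p (PySem.List.pyRange 0 9 1)).getD ([], 0, 0, [])

-- ===== PRECONDITION & SPEC =====
-- Pre_ excludes exactly the inputs where A does not return a tuple: boards where scanning in order
-- hits a missing cell before any 0 (IndexError) and boards whose first 3x3 prefix has no 0 (A returns None).
def Pre_getMovable (p : List (List Int)) : Prop :=
  ∃ k < 9, pvCell p ((k : Nat) / 3 : Nat) ((k : Nat) % 3 : Nat) = some 0 ∧
    ∀ m < k, pvCell p ((m : Nat) / 3 : Nat) ((m : Nat) % 3 : Nat) ≠ none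
instance (p : List (List Int)) : Decidable (Pre_getMovable p) := by unfold Pre_getMovable; infer_instance

def pvWitness_getMovable : List (List Int) := [[0,1,2],[3,4,5],[6,7,8]]

def Spec_getMovable (p : List (List Int)) (out : List Int × Int × Int × List String) : Prop := out = getMovable_alt p
instance (p : List (List Int)) (out : List Int × Int × Int × List String) : Decidable (Spec_getMovable p out) := by unfold Spec_getMovable; infer_instance

-- ===== CLAIM =====
def Claim_equal_getMovable : Prop := ∀ (p : List (List Int)), Dom_getMovable p → Pre_getMovable p → Spec_getMovable p (getMovable p)

-- ===== LEMMAS AND PROOFS =====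
-- A's pair list is exactly B's flat range mapped through divmod
theorem pairs_eq :
    pvPairs = (PySem.List.pyRange 0 9 1).map
      (fun k => (PySem.Int.floordiv k 3, PySem.Int.mod k 3)) := by decide

-- on each k the loops visit, A's hard-coded table equals B's delta-derived pair
theorem table_eq : ∀ k ∈ PySem.List.pyRange 0 9 1,
    tableA (PySem.Int.floordiv k 3) (PySem.Int.mod k 3)
      = outB (PySem.Int.floordiv k 3) (PySem.Int.mod k 3) := by decide

theorem go_eq (p : List (List Int)) :
    ∀ ks : List Int,
      (∀ k ∈ ks, tableA (PySem.Int.floordiv k 3) (PySem.Int.mod k 3)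
        = outB (PySem.Int.floordiv k 3) (PySem.Int.mod k 3)) →
      goA p (ks.map (fun k => (PySem.Int.floordiv k 3, PySem.Int.mod k 3))) = goB p ks := by
  intro ks
  induction ks with
  | nil => intro _; rfl
  | cons k rest ih =>
    intro h
    have htab := h k (List.mem_cons_self ..)
    simp only [List.map, goA, goB]
    cases pvCell p (PySem.Int.floordiv k 3) (PySem.Int.mod k 3) with
    | none => rfl
    | some v =>
      dsimp only
      by_cases hv : v = 0
      · simp only [if_pos hv, htab]
      · simp only [if_neg hv]
        exact ih (fun x hx => h x (List.mem_cons_of_mem _ hx))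

-- ===== VERDICT =====
theorem getMovable_spec : Claim_equal_getMovable := by
  intro p _ _
  unfold Spec_getMovable getMovable getMovable_alt
  rw [pairs_eq, go_eq p _ table_eq]
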